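-- pv_equiv track=rewrite | github.com/dietmarja/ECM | generators/generate_curricula_v3.py | generate_module_outcomes
-- ===== SOURCE A (Python) =====
-- def generate_module_outcomes(curriculum_data):
--     """Generate individual module learning outcomes with highly distinctive competence verbs"""
--     module_outcomes = []
--
--     for i, module_name in enumerate(curriculum_data['modules']):
--         # Generate EQF-appropriate outcomes with highly distinctive competence verbs per module
--         if 'Leadership' in module_name or 'Strategic' in module_name:
--             knowledge = f"Evaluate leadership theories, change management principles, and organizational dynamics relevant to {module_name.lower()}"
--             skills = f"Apply leadership techniques, stakeholder engagement methods, and change management approaches in {module_name.lower()} contexts"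
--             competences = f"Champion strategic transformation initiatives, orchestrate organizational change processes, and steward executive stakeholder alignment in {module_name.lower()} practice with autonomous decision-making authority"
--         elif 'Data' in module_name or 'Analytics' in module_name:
--             knowledge = f"Analyze data analysis methodologies, statistical techniques, and data management principles for {module_name.lower()}"
--             skills = f"Apply analytical tools, visualization software, and reporting platforms for {module_name.lower()} implementation"
--             competences = f"Govern analytical workflows with autonomous quality control, ensure data integrity protocols using independent professional judgment, and pioneer evidence-based decision-making in {module_name.lower()} contexts"
--         elif 'Technology' in module_name or 'Digital' in module_name or 'Tools' in module_name:
--             knowledge = f"Understand technologies, system integration principles, and technical standards relevant to {module_name.lower()}"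
--             skills = f"Apply tools, implementation methodologies, and technical solutions for {module_name.lower()} delivery"
--             competences = f"Orchestrate technology integration workflows with independent technical decision-making, champion innovation processes using autonomous professional judgment, and cultivate technical excellence in {module_name.lower()} contexts"
--         elif 'Monitoring' in module_name or 'Reporting' in module_name or 'Performance' in module_name:
--             knowledge = f"Understand monitoring frameworks, reporting standards, and performance measurement principles for {module_name.lower()}"
--             skills = f"Apply monitoring tools, reporting methodologies, and performance analysis techniques for {module_name.lower()} implementation"
--             competences = f"Govern stakeholder-facing performance reporting with autonomous quality control, orchestrate measurement workflows using independent professional judgment, and nurture accountability standards in {module_name.lower()} contexts"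
--         elif 'Management' in module_name or 'Coordination' in module_name:
--             knowledge = f"Understand management principles, coordination frameworks, and organizational systems relevant to {module_name.lower()}"
--             skills = f"Apply management techniques, coordination methods, and organizational tools for {module_name.lower()} delivery"
--             competences = f"Oversee cross-functional programme coordination with autonomous professional judgment, facilitate multi-stakeholder operations using independent management capabilities, and steward operational excellence in {module_name.lower()} contexts"
--         elif 'Advisory' in module_name or 'Consultant' in module_name or 'Client' in module_name:
--             knowledge = f"Understand advisory methodologies, client engagement principles, and consultation frameworks for {module_name.lower()}"
--             skills = f"Apply consultation techniques, client analysis methods, and advisory tools for {module_name.lower()} delivery"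
--             competences = f"Nurture advisory relationships with autonomous professional judgment, cultivate client partnerships using independent relationship management, and champion stakeholder trust in {module_name.lower()} contexts"
--         elif 'Design' in module_name or 'Architecture' in module_name or 'Solution' in module_name:
--             knowledge = f"Understand design principles, architectural frameworks, and solution methodologies for {module_name.lower()}"
--             skills = f"Apply design techniques, architectural methods, and solution development tools for {module_name.lower()} implementation"
--             competences = f"Pioneer design innovation workflows with independent strategic thinking, architect sustainable solutions using autonomous design decision-making, and cultivate creative excellence in {module_name.lower()} contexts"
--         elif 'Training' in module_name or 'Education' in module_name or 'Development' in module_name: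
--             knowledge = f"Understand educational principles, training methodologies, and development frameworks for {module_name.lower()}"
--             skills = f"Apply training techniques, educational tools, and development methods for {module_name.lower()} delivery"
--             competences = f"Facilitate capability development activities with autonomous educational leadership, nurture learning environments using independent pedagogical judgment, and steward professional progression in {module_name.lower()} contexts"
--         elif 'Change' in module_name:
--             knowledge = f"Understand change management theories, organizational transformation principles, and change implementation frameworks for {module_name.lower()}"
--             skills = f"Apply change management techniques, transformation methodologies, and implementation tools for {module_name.lower()} delivery"
--             competences = f"Navigate organizational transformation activities with autonomous change leadership, shepherd change processes using independent professional judgment, and champion stakeholder adoption in {module_name.lower()} contexts"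
--         else:
--             knowledge = f"Understand core principles, theoretical frameworks, and methodological approaches relevant to {module_name.lower()}"
--             skills = f"Apply practical techniques, professional tools, and implementation methodologies for {module_name.lower()} delivery"
--             competences = f"Coordinate professional activities with autonomous judgment, nurture quality standards using independent professional decision-making, and steward stakeholder relationships in {module_name.lower()} contexts"
--
--         module_outcomes.append({
--             'module_name': module_name,
--             'knowledge_outcome': knowledge,
--             'skills_outcome': skills,
--             'competences_outcome': competences
--         })
--
--     return module_outcomes
-- ===== SOURCE B (Python) =====
-- """Different decomposition: classification is a MINIMUM over a flat keyword->group-id map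
-- (no ordered first-match rule scan), and each group's outcome builders are indexed functions."""
--
--
-- def _mk(knowledge, skills, competences):
--     return knowledge, skills, competences
--
--
-- # Flat map from each keyword to the id of its outcome group (ids 0..8; 9 = generic).
-- _GROUP_OF_KEYWORD = {
--     'Leadership': 0, 'Strategic': 0,
--     'Data': 1, 'Analytics': 1,
--     'Technology': 2, 'Digital': 2, 'Tools': 2,
--     'Monitoring': 3, 'Reporting': 3, 'Performance': 3,
--     'Management': 4, 'Coordination': 4,
--     'Advisory': 5, 'Consultant': 5, 'Client': 5,
--     'Design': 6, 'Architecture': 6, 'Solution': 6,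
--     'Training': 7, 'Education': 7, 'Development': 7,
--     'Change': 8,
-- }
--
-- # Outcome builders, indexed by group id 0..9; each maps the lowered module name to its three outcome texts.
-- _BUILDERS = [
--     lambda m: _mk(
--         f"Evaluate leadership theories, change management principles, and organizational dynamics relevant to {m}",
--         f"Apply leadership techniques, stakeholder engagement methods, and change management approaches in {m} contexts",
--         f"Champion strategic transformation initiatives, orchestrate organizational change processes, and steward executive stakeholder alignment in {m} practice with autonomous decision-making authority"),
--     lambda m: _mk(
--         f"Analyze data analysis methodologies, statistical techniques, and data management principles for {m}",
--         f"Apply analytical tools, visualization software, and reporting platforms for {m} implementation",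
--         f"Govern analytical workflows with autonomous quality control, ensure data integrity protocols using independent professional judgment, and pioneer evidence-based decision-making in {m} contexts"),
--     lambda m: _mk(
--         f"Understand technologies, system integration principles, and technical standards relevant to {m}",
--         f"Apply tools, implementation methodologies, and technical solutions for {m} delivery",
--         f"Orchestrate technology integration workflows with independent technical decision-making, champion innovation processes using autonomous professional judgment, and cultivate technical excellence in {m} contexts"),
--     lambda m: _mk(
--         f"Understand monitoring frameworks, reporting standards, and performance measurement principles for {m}",
--         f"Apply monitoring tools, reporting methodologies, and performance analysis techniques for {m} implementation",
--         f"Govern stakeholder-facing performance reporting with autonomous quality control, orchestrate measurement workflows using independent professional judgment, and nurture accountability standards in {m} contexts"),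
--     lambda m: _mk(
--         f"Understand management principles, coordination frameworks, and organizational systems relevant to {m}",
--         f"Apply management techniques, coordination methods, and organizational tools for {m} delivery",
--         f"Oversee cross-functional programme coordination with autonomous professional judgment, facilitate multi-stakeholder operations using independent management capabilities, and steward operational excellence in {m} contexts"),
--     lambda m: _mk(
--         f"Understand advisory methodologies, client engagement principles, and consultation frameworks for {m}",
--         f"Apply consultation techniques, client analysis methods, and advisory tools for {m} delivery",
--         f"Nurture advisory relationships with autonomous professional judgment, cultivate client partnerships using independent relationship management, and champion stakeholder trust in {m} contexts"),
--     lambda m: _mk(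
--         f"Understand design principles, architectural frameworks, and solution methodologies for {m}",
--         f"Apply design techniques, architectural methods, and solution development tools for {m} implementation",
--         f"Pioneer design innovation workflows with independent strategic thinking, architect sustainable solutions using autonomous design decision-making, and cultivate creative excellence in {m} contexts"),
--     lambda m: _mk(
--         f"Understand educational principles, training methodologies, and development frameworks for {m}",
--         f"Apply training techniques, educational tools, and development methods for {m} delivery",
--         f"Facilitate capability development activities with autonomous educational leadership, nurture learning environments using independent pedagogical judgment, and steward professional progression in {m} contexts"),
--     lambda m: _mk(
--         f"Understand change management theories, organizational transformation principles, and change implementation frameworks for {m}",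
--         f"Apply change management techniques, transformation methodologies, and implementation tools for {m} delivery",
--         f"Navigate organizational transformation activities with autonomous change leadership, shepherd change processes using independent professional judgment, and champion stakeholder adoption in {m} contexts"),
--     lambda m: _mk(
--         f"Understand core principles, theoretical frameworks, and methodological approaches relevant to {m}",
--         f"Apply practical techniques, professional tools, and implementation methodologies for {m} delivery",
--         f"Coordinate professional activities with autonomous judgment, nurture quality standards using independent professional decision-making, and steward stakeholder relationships in {m} contexts"),
-- ]
--
--
-- def _outcome(module_name):
--     # The group is the smallest id among all matching keywords (9 = generic fallback).
--     group = min((g for kw, g in _GROUP_OF_KEYWORD.items() if kw in module_name), default=9)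
--     knowledge, skills, competences = _BUILDERS[group](module_name.lower())
--     return {
--         'module_name': module_name,
--         'knowledge_outcome': knowledge,
--         'skills_outcome': skills,
--         'competences_outcome': competences,
--     }
--
--
-- def generate_module_outcomes(curriculum_data):
--     return [_outcome(m) for m in curriculum_data['modules']]
-- ===== Notes on version B (the rewrite author's own statement) =====
-- stated objective: alternative
-- what changed: Classification no longer scans ordered rules: B takes the MINIMUM group id over a flat keyword->group-id dictionary of all keywords matching the module name (order-independent, correct because A's first-match groups are numbered in priority order), then dispatches to an indexed list of outcome-builder functions; the result list is a comprehension instead of an append loop.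
import Mathlib
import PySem

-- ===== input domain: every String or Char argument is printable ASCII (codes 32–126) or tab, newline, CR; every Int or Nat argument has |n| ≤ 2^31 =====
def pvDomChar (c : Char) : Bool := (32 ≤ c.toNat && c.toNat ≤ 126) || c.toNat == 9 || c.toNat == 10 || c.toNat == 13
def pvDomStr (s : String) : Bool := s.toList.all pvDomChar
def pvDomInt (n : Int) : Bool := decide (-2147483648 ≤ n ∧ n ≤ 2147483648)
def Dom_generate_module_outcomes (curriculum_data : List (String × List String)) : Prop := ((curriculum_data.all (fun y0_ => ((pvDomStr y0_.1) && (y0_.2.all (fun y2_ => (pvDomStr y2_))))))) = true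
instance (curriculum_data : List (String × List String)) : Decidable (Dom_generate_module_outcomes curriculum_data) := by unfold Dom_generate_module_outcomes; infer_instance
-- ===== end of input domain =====

-- B classifies each module by the MINIMUM group id over a flat keyword->group map and indexed outcome builders, replacing A's ordered if/elif chain; return values proved equal on inputs whose dict has a 'modules' key (else A raises KeyError).


-- ===== PORT A =====
-- transliteration of A's if/elif chain; f-strings become literal ++ module_name.lower() concatenations
def pvEntryA (module_name : String) : List (String × String) :=
  let (knowledge, skills, competences) :=
    if PySem.Str.isIn "Leadership" module_name || PySem.Str.isIn "Strategic" module_name then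
      ("Evaluate leadership theories, change management principles, and organizational dynamics relevant to " ++ (PySem.Str.lower module_name),
       "Apply leadership techniques, stakeholder engagement methods, and change management approaches in " ++ (PySem.Str.lower module_name) ++ " contexts",
       "Champion strategic transformation initiatives, orchestrate organizational change processes, and steward executive stakeholder alignment in " ++ (PySem.Str.lower module_name) ++ " practice with autonomous decision-making authority")
    else if PySem.Str.isIn "Data" module_name || PySem.Str.isIn "Analytics" module_name then
      ("Analyze data analysis methodologies, statistical techniques, and data management principles for " ++ (PySem.Str.lower module_name),
       "Apply analytical tools, visualization software, and reporting platforms for " ++ (PySem.Str.lower module_name) ++ " implementation",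
       "Govern analytical workflows with autonomous quality control, ensure data integrity protocols using independent professional judgment, and pioneer evidence-based decision-making in " ++ (PySem.Str.lower module_name) ++ " contexts")
    else if PySem.Str.isIn "Technology" module_name || PySem.Str.isIn "Digital" module_name || PySem.Str.isIn "Tools" module_name then
      ("Understand technologies, system integration principles, and technical standards relevant to " ++ (PySem.Str.lower module_name),
       "Apply tools, implementation methodologies, and technical solutions for " ++ (PySem.Str.lower module_name) ++ " delivery",
       "Orchestrate technology integration workflows with independent technical decision-making, champion innovation processes using autonomous professional judgment, and cultivate technical excellence in " ++ (PySem.Str.lower module_name) ++ " contexts")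
    else if PySem.Str.isIn "Monitoring" module_name || PySem.Str.isIn "Reporting" module_name || PySem.Str.isIn "Performance" module_name then
      ("Understand monitoring frameworks, reporting standards, and performance measurement principles for " ++ (PySem.Str.lower module_name),
       "Apply monitoring tools, reporting methodologies, and performance analysis techniques for " ++ (PySem.Str.lower module_name) ++ " implementation",
       "Govern stakeholder-facing performance reporting with autonomous quality control, orchestrate measurement workflows using independent professional judgment, and nurture accountability standards in " ++ (PySem.Str.lower module_name) ++ " contexts")
    else if PySem.Str.isIn "Management" module_name || PySem.Str.isIn "Coordination" module_name then
      ("Understand management principles, coordination frameworks, and organizational systems relevant to " ++ (PySem.Str.lower module_name),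
       "Apply management techniques, coordination methods, and organizational tools for " ++ (PySem.Str.lower module_name) ++ " delivery",
       "Oversee cross-functional programme coordination with autonomous professional judgment, facilitate multi-stakeholder operations using independent management capabilities, and steward operational excellence in " ++ (PySem.Str.lower module_name) ++ " contexts")
    else if PySem.Str.isIn "Advisory" module_name || PySem.Str.isIn "Consultant" module_name || PySem.Str.isIn "Client" module_name then
      ("Understand advisory methodologies, client engagement principles, and consultation frameworks for " ++ (PySem.Str.lower module_name),
       "Apply consultation techniques, client analysis methods, and advisory tools for " ++ (PySem.Str.lower module_name) ++ " delivery",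
       "Nurture advisory relationships with autonomous professional judgment, cultivate client partnerships using independent relationship management, and champion stakeholder trust in " ++ (PySem.Str.lower module_name) ++ " contexts")
    else if PySem.Str.isIn "Design" module_name || PySem.Str.isIn "Architecture" module_name || PySem.Str.isIn "Solution" module_name then
      ("Understand design principles, architectural frameworks, and solution methodologies for " ++ (PySem.Str.lower module_name),
       "Apply design techniques, architectural methods, and solution development tools for " ++ (PySem.Str.lower module_name) ++ " implementation",
       "Pioneer design innovation workflows with independent strategic thinking, architect sustainable solutions using autonomous design decision-making, and cultivate creative excellence in " ++ (PySem.Str.lower module_name) ++ " contexts")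
    else if PySem.Str.isIn "Training" module_name || PySem.Str.isIn "Education" module_name || PySem.Str.isIn "Development" module_name then
      ("Understand educational principles, training methodologies, and development frameworks for " ++ (PySem.Str.lower module_name),
       "Apply training techniques, educational tools, and development methods for " ++ (PySem.Str.lower module_name) ++ " delivery",
       "Facilitate capability development activities with autonomous educational leadership, nurture learning environments using independent pedagogical judgment, and steward professional progression in " ++ (PySem.Str.lower module_name) ++ " contexts")
    else if PySem.Str.isIn "Change" module_name then
      ("Understand change management theories, organizational transformation principles, and change implementation frameworks for " ++ (PySem.Str.lower module_name),
       "Apply change management techniques, transformation methodologies, and implementation tools for " ++ (PySem.Str.lower module_name) ++ " delivery",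
       "Navigate organizational transformation activities with autonomous change leadership, shepherd change processes using independent professional judgment, and champion stakeholder adoption in " ++ (PySem.Str.lower module_name) ++ " contexts")
    else
      ("Understand core principles, theoretical frameworks, and methodological approaches relevant to " ++ (PySem.Str.lower module_name),
       "Apply practical techniques, professional tools, and implementation methodologies for " ++ (PySem.Str.lower module_name) ++ " delivery",
       "Coordinate professional activities with autonomous judgment, nurture quality standards using independent professional decision-making, and steward stakeholder relationships in " ++ (PySem.Str.lower module_name) ++ " contexts")
  [("module_name", module_name),
   ("knowledge_outcome", knowledge),
   ("skills_outcome", skills),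
   ("competences_outcome", competences)]

def generate_module_outcomes (curriculum_data : List (String × List String)) : List (List (String × String)) :=
  match (PySem.Dict.mk curriculum_data).get? "modules" with
  | none => []
  | some ms => (PySem.List.enumerate ms).foldl (fun acc p => acc ++ [pvEntryA p.2]) []

-- ===== PORT B =====
-- flat keyword -> group-id map (_GROUP_OF_KEYWORD in Source B)
def pvGroupOfKeyword : List (String × Nat) :=
  [("Leadership", 0), ("Strategic", 0),
   ("Data", 1), ("Analytics", 1),
   ("Technology", 2), ("Digital", 2), ("Tools", 2),
   ("Monitoring", 3), ("Reporting", 3), ("Performance", 3),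
   ("Management", 4), ("Coordination", 4),
   ("Advisory", 5), ("Consultant", 5), ("Client", 5),
   ("Design", 6), ("Architecture", 6), ("Solution", 6),
   ("Training", 7), ("Education", 7), ("Development", 7),
   ("Change", 8)]

-- outcome builders indexed by group id (_BUILDERS in Source B); f-strings become concatenations
def pvBuilders : List (String → String × String × String) :=
  [fun m =>
    ("Evaluate leadership theories, change management principles, and organizational dynamics relevant to " ++ m,
     "Apply leadership techniques, stakeholder engagement methods, and change management approaches in " ++ m ++ " contexts",
     "Champion strategic transformation initiatives, orchestrate organizational change processes, and steward executive stakeholder alignment in " ++ m ++ " practice with autonomous decision-making authority"),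
   fun m =>
    ("Analyze data analysis methodologies, statistical techniques, and data management principles for " ++ m,
     "Apply analytical tools, visualization software, and reporting platforms for " ++ m ++ " implementation",
     "Govern analytical workflows with autonomous quality control, ensure data integrity protocols using independent professional judgment, and pioneer evidence-based decision-making in " ++ m ++ " contexts"),
   fun m =>
    ("Understand technologies, system integration principles, and technical standards relevant to " ++ m,
     "Apply tools, implementation methodologies, and technical solutions for " ++ m ++ " delivery",
     "Orchestrate technology integration workflows with independent technical decision-making, champion innovation processes using autonomous professional judgment, and cultivate technical excellence in " ++ m ++ " contexts"),
   fun m =>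
    ("Understand monitoring frameworks, reporting standards, and performance measurement principles for " ++ m,
     "Apply monitoring tools, reporting methodologies, and performance analysis techniques for " ++ m ++ " implementation",
     "Govern stakeholder-facing performance reporting with autonomous quality control, orchestrate measurement workflows using independent professional judgment, and nurture accountability standards in " ++ m ++ " contexts"),
   fun m =>
    ("Understand management principles, coordination frameworks, and organizational systems relevant to " ++ m,
     "Apply management techniques, coordination methods, and organizational tools for " ++ m ++ " delivery",
     "Oversee cross-functional programme coordination with autonomous professional judgment, facilitate multi-stakeholder operations using independent management capabilities, and steward operational excellence in " ++ m ++ " contexts"),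
   fun m =>
    ("Understand advisory methodologies, client engagement principles, and consultation frameworks for " ++ m,
     "Apply consultation techniques, client analysis methods, and advisory tools for " ++ m ++ " delivery",
     "Nurture advisory relationships with autonomous professional judgment, cultivate client partnerships using independent relationship management, and champion stakeholder trust in " ++ m ++ " contexts"),
   fun m =>
    ("Understand design principles, architectural frameworks, and solution methodologies for " ++ m,
     "Apply design techniques, architectural methods, and solution development tools for " ++ m ++ " implementation",
     "Pioneer design innovation workflows with independent strategic thinking, architect sustainable solutions using autonomous design decision-making, and cultivate creative excellence in " ++ m ++ " contexts"),
   fun m =>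
    ("Understand educational principles, training methodologies, and development frameworks for " ++ m,
     "Apply training techniques, educational tools, and development methods for " ++ m ++ " delivery",
     "Facilitate capability development activities with autonomous educational leadership, nurture learning environments using independent pedagogical judgment, and steward professional progression in " ++ m ++ " contexts"),
   fun m =>
    ("Understand change management theories, organizational transformation principles, and change implementation frameworks for " ++ m,
     "Apply change management techniques, transformation methodologies, and implementation tools for " ++ m ++ " delivery",
     "Navigate organizational transformation activities with autonomous change leadership, shepherd change processes using independent professional judgment, and champion stakeholder adoption in " ++ m ++ " contexts"),
   fun m =>
    ("Understand core principles, theoretical frameworks, and methodological approaches relevant to " ++ m,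
     "Apply practical techniques, professional tools, and implementation methodologies for " ++ m ++ " delivery",
     "Coordinate professional activities with autonomous judgment, nurture quality standards using independent professional decision-making, and steward stakeholder relationships in " ++ m ++ " contexts")]

-- group = min((g for kw, g in _GROUP_OF_KEYWORD.items() if kw in name), default=9)
def pvGroup (name : String) : Nat :=
  (PySem.List.min? ((pvGroupOfKeyword.filter (fun q => PySem.Str.isIn q.1 name)).map Prod.snd) (fun y => y)).getD 9

-- _outcome(module_name); _BUILDERS[group] is indexed with getD: group ≤ 9 always, so the index is in range
def pvOutcome (module_name : String) : List (String × String) :=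
  let (knowledge, skills, competences) :=
    (pvBuilders.getD (pvGroup module_name) (fun _ => ("", "", ""))) (PySem.Str.lower module_name)
  [("module_name", module_name),
   ("knowledge_outcome", knowledge),
   ("skills_outcome", skills),
   ("competences_outcome", competences)]

def generate_module_outcomes_alt (curriculum_data : List (String × List String)) : List (List (String × String)) :=
  match (PySem.Dict.mk curriculum_data).get? "modules" with
  | none => []
  | some ms => ms.map pvOutcome

-- ===== PRECONDITION & SPEC =====
-- Pre_ excludes exactly the inputs whose dict lacks the 'modules' key, where Python A raises KeyError.
def Pre_generate_module_outcomes (curriculum_data : List (String × List String)) : Prop :=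
  (PySem.Dict.mk curriculum_data).contains "modules" = true
instance (curriculum_data : List (String × List String)) : Decidable (Pre_generate_module_outcomes curriculum_data) := by unfold Pre_generate_module_outcomes; infer_instance

def pvWitness_generate_module_outcomes : (List (String × List String)) := [("modules", ["Data Science", "Leadership Basics"])]

def Spec_generate_module_outcomes (curriculum_data : List (String × List String)) (out : List (List (String × String))) : Prop := out = generate_module_outcomes_alt curriculum_data
instance (curriculum_data : List (String × List String)) (out : List (List (String × String))) : Decidable (Spec_generate_module_outcomes curriculum_data out) := by unfold Spec_generate_module_outcomes; infer_instance

-- ===== CLAIM =====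
def Claim_equal_generate_module_outcomes : Prop := ∀ (curriculum_data : List (String × List String)), Dom_generate_module_outcomes curriculum_data → Pre_generate_module_outcomes curriculum_data → Spec_generate_module_outcomes curriculum_data (generate_module_outcomes curriculum_data)

-- ===== LEMMAS AND PROOFS =====

-- min(xs, default=9) = k when k is in xs and is a lower bound
theorem pv_min_getD (xs : List Nat) (k : Nat) (hm : k ∈ xs) (hb : ∀ x ∈ xs, k ≤ x) :
    (PySem.List.min? xs (fun y => y)).getD 9 = k := by
  cases xs with
  | nil => cases hm
  | cons a t =>
    rw [PySem.List.min?_id_cons]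
    have h1 := PySem.List.foldl_min_le t a
    have h2 := PySem.List.foldl_min_mem t a
    have hk : k ≤ t.foldl min a := by
      rcases h2 with h | h
      · rw [h]; exact hb a (List.mem_cons_self ..)
      · exact hb _ (List.mem_cons_of_mem _ h)
    have hk2 : t.foldl min a ≤ k := by
      rcases List.mem_cons.mp hm with rfl | h
      · exact h1.1
      · exact h1.2 _ h
    simpa using le_antisymm hk2 hk

-- the selected group is k when some keyword of group k matches and every matching keyword has group ≥ k
theorem pv_group_eq (name : String) (k : Nat)
    (hmem : ∃ q ∈ pvGroupOfKeyword, PySem.Str.isIn q.1 name = true ∧ q.2 = k)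
    (hlow : ∀ q ∈ pvGroupOfKeyword, PySem.Str.isIn q.1 name = true → k ≤ q.2) :
    pvGroup name = k := by
  unfold pvGroup
  apply pv_min_getD
  · obtain ⟨q, hq, hqt, hqk⟩ := hmem
    exact List.mem_map.mpr ⟨q, List.mem_filter.mpr ⟨hq, hqt⟩, hqk⟩
  · intro x hx
    obtain ⟨q, hq, rfl⟩ := List.mem_map.mp hx
    obtain ⟨hq1, hq2⟩ := List.mem_filter.mp hq
    exact hlow q hq1 hq2

-- per-module agreement: A's branch chain and B's minimum-group selection build the same dict
theorem pvEntry_eq (name : String) : pvEntryA name = pvOutcome name := by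
  by_cases h1 : (PySem.Str.isIn "Leadership" name || PySem.Str.isIn "Strategic" name) = true
  · have hg : pvGroup name = 0 := by
      apply pv_group_eq
      · rcases Bool.or_eq_true_iff.mp h1 with h | h
        · exact ⟨("Leadership", 0), by decide, h, rfl⟩
        · exact ⟨("Strategic", 0), by decide, h, rfl⟩
      · intro q hq _; exact Nat.zero_le _
    simp only [pvEntryA, pvOutcome, pvBuilders, hg, h1]
    rfl
  · 
    by_cases h2 : (PySem.Str.isIn "Data" name || PySem.Str.isIn "Analytics" name) = true
    · have hg : pvGroup name = 1 := by
        apply pv_group_eq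
        · rcases Bool.or_eq_true_iff.mp h2 with h | h
          · exact ⟨("Data", 1), by decide, h, rfl⟩
          · exact ⟨("Analytics", 1), by decide, h, rfl⟩
        · intro q hq hqt; fin_cases hq <;> simp_all
      simp only [pvEntryA, pvOutcome, pvBuilders, hg, h1, h2]
      rfl
    · 
      by_cases h3 : (PySem.Str.isIn "Technology" name || PySem.Str.isIn "Digital" name || PySem.Str.isIn "Tools" name) = true
      · have hg : pvGroup name = 2 := by
          apply pv_group_eq
          · rcases Bool.or_eq_true_iff.mp h3 with h | h
            · rcases Bool.or_eq_true_iff.mp h with h | h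
              · exact ⟨("Technology", 2), by decide, h, rfl⟩
              · exact ⟨("Digital", 2), by decide, h, rfl⟩
            · exact ⟨("Tools", 2), by decide, h, rfl⟩
          · intro q hq hqt; fin_cases hq <;> simp_all
        simp only [pvEntryA, pvOutcome, pvBuilders, hg, h1, h2, h3]
        rfl
      · 
        by_cases h4 : (PySem.Str.isIn "Monitoring" name || PySem.Str.isIn "Reporting" name || PySem.Str.isIn "Performance" name) = true
        · have hg : pvGroup name = 3 := by
            apply pv_group_eq
            · rcases Bool.or_eq_true_iff.mp h4 with h | h
              · rcases Bool.or_eq_true_iff.mp h with h | h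
                · exact ⟨("Monitoring", 3), by decide, h, rfl⟩
                · exact ⟨("Reporting", 3), by decide, h, rfl⟩
              · exact ⟨("Performance", 3), by decide, h, rfl⟩
            · intro q hq hqt; fin_cases hq <;> simp_all
          simp only [pvEntryA, pvOutcome, pvBuilders, hg, h1, h2, h3, h4]
          rfl
        · 
          by_cases h5 : (PySem.Str.isIn "Management" name || PySem.Str.isIn "Coordination" name) = true
          · have hg : pvGroup name = 4 := by
              apply pv_group_eq
              · rcases Bool.or_eq_true_iff.mp h5 with h | h
                · exact ⟨("Management", 4), by decide, h, rfl⟩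
                · exact ⟨("Coordination", 4), by decide, h, rfl⟩
              · intro q hq hqt; fin_cases hq <;> simp_all
            simp only [pvEntryA, pvOutcome, pvBuilders, hg, h1, h2, h3, h4, h5]
            rfl
          · 
            by_cases h6 : (PySem.Str.isIn "Advisory" name || PySem.Str.isIn "Consultant" name || PySem.Str.isIn "Client" name) = true
            · have hg : pvGroup name = 5 := by
                apply pv_group_eq
                · rcases Bool.or_eq_true_iff.mp h6 with h | h
                  · rcases Bool.or_eq_true_iff.mp h with h | h
                    · exact ⟨("Advisory", 5), by decide, h, rfl⟩
                    · exact ⟨("Consultant", 5), by decide, h, rfl⟩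
                  · exact ⟨("Client", 5), by decide, h, rfl⟩
                · intro q hq hqt; fin_cases hq <;> simp_all
              simp only [pvEntryA, pvOutcome, pvBuilders, hg, h1, h2, h3, h4, h5, h6]
              rfl
            · 
              by_cases h7 : (PySem.Str.isIn "Design" name || PySem.Str.isIn "Architecture" name || PySem.Str.isIn "Solution" name) = true
              · have hg : pvGroup name = 6 := by
                  apply pv_group_eq
                  · rcases Bool.or_eq_true_iff.mp h7 with h | h
                    · rcases Bool.or_eq_true_iff.mp h with h | h
                      · exact ⟨("Design", 6), by decide, h, rfl⟩
                      · exact ⟨("Architecture", 6), by decide, h, rfl⟩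
                    · exact ⟨("Solution", 6), by decide, h, rfl⟩
                  · intro q hq hqt; fin_cases hq <;> simp_all
                simp only [pvEntryA, pvOutcome, pvBuilders, hg, h1, h2, h3, h4, h5, h6, h7]
                rfl
              · 
                by_cases h8 : (PySem.Str.isIn "Training" name || PySem.Str.isIn "Education" name || PySem.Str.isIn "Development" name) = true
                · have hg : pvGroup name = 7 := by
                    apply pv_group_eq
                    · rcases Bool.or_eq_true_iff.mp h8 with h | h
                      · rcases Bool.or_eq_true_iff.mp h with h | h
                        · exact ⟨("Training", 7), by decide, h, rfl⟩
                        · exact ⟨("Education", 7), by decide, h, rfl⟩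
                      · exact ⟨("Development", 7), by decide, h, rfl⟩
                    · intro q hq hqt; fin_cases hq <;> simp_all
                  simp only [pvEntryA, pvOutcome, pvBuilders, hg, h1, h2, h3, h4, h5, h6, h7, h8]
                  rfl
                · 
                  by_cases h9 : (PySem.Str.isIn "Change" name) = true
                  · have hg : pvGroup name = 8 := by
                      apply pv_group_eq
                      · exact ⟨("Change", 8), by decide, h9, rfl⟩
                      · intro q hq hqt; fin_cases hq <;> simp_all
                    simp only [pvEntryA, pvOutcome, pvBuilders, hg, h1, h2, h3, h4, h5, h6, h7, h8, h9]
                    rfl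
                  · 
                    have hg : pvGroup name = 9 := by
                      unfold pvGroup
                      have hnil : pvGroupOfKeyword.filter (fun q => PySem.Str.isIn q.1 name) = [] := by
                        rw [List.filter_eq_nil_iff]; intro q hq; fin_cases hq <;> simp_all
                      rw [hnil]; rfl
                    simp only [pvEntryA, pvOutcome, pvBuilders, hg, h1, h2, h3, h4, h5, h6, h7, h8, h9]
                    rfl

-- ===== VERDICT =====
theorem generate_module_outcomes_spec : Claim_equal_generate_module_outcomes := by
  intro curriculum_data _ _
  unfold Spec_generate_module_outcomes generate_module_outcomes generate_module_outcomes_alt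
  cases (PySem.Dict.mk curriculum_data).get? "modules" with
  | none => rfl
  | some ms =>
    dsimp only
    rw [PySem.List.foldl_append_singleton_eq_map]
    rw [show (fun p : Int × String => pvEntryA p.2) = (pvEntryA ∘ (·.2)) from rfl,
        ← List.map_map, PySem.List.map_snd_enumerate]
    exact List.map_congr_left (fun x _ => pvEntry_eq x)
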